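-- pv_equiv track=rewrite | github.com/loociano/advent-of-code | aoc2024/src/day12/python/solution.py | _calculate_sides
-- ===== SOURCE A (Python) =====
-- def _calculate_sides(perimeters: dict[str, list[int]]) -> int:
--   """Calculates number of sides given perimeter data."""
--   sides = 0
--   for coords in perimeters.values():
--     sides += 1  # Each group of coordinates represents at least one side.
--     sorted_coords = sorted(coords)
--     for i in range(1, len(sorted_coords)):
--       if sorted_coords[i] > sorted_coords[i - 1] + 1:
--         # Coordinates are disjointed, hence 2 different sides.
--         sides += 1
--   return sides
-- ===== SOURCE B (Python) =====
-- def _calculate_sides(perimeters: dict[str, list[int]]) -> int: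
--   """Calculates number of sides given perimeter data."""
--   sides = 0
--   for coords in perimeters.values():
--     s = set(coords)
--     # One side per maximal run of consecutive coordinates (a run starts at v
--     # when v - 1 is absent); each group represents at least one side.
--     sides += max(1, sum(1 for v in s if v - 1 not in s))
--   return sides
-- ===== Notes on version B (the rewrite author's own statement) =====
-- stated objective: alternative
-- what changed: Replaces the per-group sort + adjacent-gap index scan with an order-free hash-set pass counting run starts (values v with v-1 absent), keeping the at-least-one-side-per-group rule.
import Mathlib
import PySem

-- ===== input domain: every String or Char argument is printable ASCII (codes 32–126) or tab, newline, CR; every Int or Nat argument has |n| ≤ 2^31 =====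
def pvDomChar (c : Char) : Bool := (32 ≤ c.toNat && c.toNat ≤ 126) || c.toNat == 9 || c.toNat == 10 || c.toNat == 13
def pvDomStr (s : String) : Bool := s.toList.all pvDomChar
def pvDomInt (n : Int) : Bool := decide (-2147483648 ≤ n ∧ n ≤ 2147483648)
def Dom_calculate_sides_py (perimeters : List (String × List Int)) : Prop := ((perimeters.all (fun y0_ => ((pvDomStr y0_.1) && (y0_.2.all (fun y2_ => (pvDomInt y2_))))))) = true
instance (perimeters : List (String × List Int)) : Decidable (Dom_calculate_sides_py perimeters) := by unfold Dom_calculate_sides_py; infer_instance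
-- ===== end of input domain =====

-- B replaces the per-group sort + adjacent-gap index scan with an order-free
-- hash-set pass counting run starts (values v with v-1 absent): objective = alternative.

-- ===== PORT A =====
def calculate_sides_py (perimeters : List (String × List Int)) : Int :=
  perimeters.foldl (fun sides kv =>
    let sorted_coords := PySem.List.sorted kv.2 (fun x => x) false
    (PySem.List.pyRange 1 (sorted_coords.length : Int) 1).foldl
      (fun acc i =>
        if PySem.List.pyGetD sorted_coords i 0 > PySem.List.pyGetD sorted_coords (i - 1) 0 + 1
        then acc + 1 else acc)
      (sides + 1)) 0

-- ===== PORT B =====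
def calculate_sides_py_alt (perimeters : List (String × List Int)) : Int :=
  perimeters.foldl (fun sides kv =>
    let s : PySem.Set Int := PySem.Set.ofList kv.2
    sides + max 1 ((s.countP (fun v => !(PySem.Set.contains s (v - 1)))) : Int)) 0

-- ===== PRECONDITION & SPEC =====
def Spec_calculate_sides_py (perimeters : List (String × List Int)) (out : Int) : Prop := out = calculate_sides_py_alt perimeters
instance (perimeters : List (String × List Int)) (out : Int) : Decidable (Spec_calculate_sides_py perimeters out) := by unfold Spec_calculate_sides_py; infer_instance

-- ===== CLAIM (what is proved, stated in full; the proofs are below) =====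
def Claim_equal_calculate_sides_py : Prop := ∀ (perimeters : List (String × List Int)), Dom_calculate_sides_py perimeters → Spec_calculate_sides_py perimeters (calculate_sides_py perimeters)

-- ===== LEMMAS AND PROOFS =====

/-- Number of adjacent gaps (strict jumps by more than 1) in a list. -/
def pvGaps : List Int → Nat
  | a :: b :: t => (if b > a + 1 then 1 else 0) + pvGaps (b :: t)
  | _ => 0

/-- B's per-group run-start count. -/
def pvSC (coords : List Int) : Nat :=
  (PySem.Set.ofList coords).countP
    (fun v => !(PySem.Set.contains (PySem.Set.ofList coords) (v - 1)))

lemma pvCountP_getD (t : List Int) : ∀ (a : Int),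
    (List.range t.length).countP
      (fun k => decide (t.getD k 0 > (a :: t).getD k 0 + 1)) = pvGaps (a :: t) := by
  induction t with
  | nil => intro a; simp [pvGaps]
  | cons b u ih =>
    intro a
    rw [List.length_cons, List.range_succ_eq_map, List.countP_cons, List.countP_map]
    have htail :
        (List.range u.length).countP
          ((fun k => decide ((b :: u).getD k 0 > (a :: b :: u).getD k 0 + 1)) ∘ Nat.succ)
        = pvGaps (b :: u) := by
      rw [← ih b]
      apply List.countP_congr
      intro k _
      simp [Function.comp]
    simp only [htail, pvGaps, List.getD_cons_zero]
    by_cases hba : b > a + 1 <;> simp [hba] <;> omega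

lemma pvGetD_shift (xs : List Int) (x : Int) (k : Nat) (d : Int) :
    PySem.List.pyGetD (x :: xs) (1 + (k : Int)) d = xs.getD k d := by
  rw [show (1 : Int) + (k : Int) = ((k + 1 : Nat) : Int) by push_cast; ring,
      PySem.List.pyGetD_natCast, List.getD_cons_succ]

lemma pvGetD_shift' (xs : List Int) (k : Nat) (d : Int) :
    PySem.List.pyGetD xs (1 + (k : Int) - 1) d = xs.getD k d := by
  rw [show (1 : Int) + (k : Int) - 1 = ((k : Nat) : Int) by ring,
      PySem.List.pyGetD_natCast]

lemma pvInner (s : List Int) :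
    (PySem.List.pyRange 1 (s.length : Int) 1).countP
      (fun i => decide (PySem.List.pyGetD s i 0 > PySem.List.pyGetD s (i - 1) 0 + 1))
    = pvGaps s := by
  cases s with
  | nil => simp [PySem.List.pyRange_one_eq_nil, pvGaps]
  | cons a t =>
    rw [PySem.List.pyRange_one, List.countP_map]
    have hlen : (((a :: t).length : Int) - 1).toNat = t.length := by
      simp
    rw [hlen, ← pvCountP_getD t a]
    apply List.countP_congr
    intro k _
    simp only [Function.comp, pvGetD_shift, pvGetD_shift']

lemma pvCountP_toFinset {l : List Int} (hl : l.Nodup) (p : Int → Bool) :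
    l.countP p = (l.toFinset.filter (fun v => p v = true)).card := by
  rw [List.countP_eq_length_filter]
  rw [← List.toFinset_card_of_nodup (hl.filter p)]
  congr 1
  ext v
  simp

lemma pvMain (s : List Int) (hs : s.Pairwise (· ≤ ·)) (hne : s ≠ []) :
    1 + pvGaps s = (s.toFinset.filter (fun v => v - 1 ∉ s.toFinset)).card := by
  classical
  induction s with
  | nil => exact absurd rfl hne
  | cons a t ih =>
    cases t with
    | nil =>
      simp [pvGaps, Finset.filter_singleton]
    | cons b u =>
      have hab : a ≤ b := (List.pairwise_cons.1 hs).1 b (by simp)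
      have htail : (b :: u).Pairwise (· ≤ ·) := (List.pairwise_cons.1 hs).2
      have hIH := ih htail (by simp)
      have hall : ∀ y ∈ b :: u, b ≤ y := by
        intro y hy
        rcases List.mem_cons.1 hy with h | h
        · omega
        · exact List.rel_of_pairwise_cons htail h
      by_cases hba : a = b
      · -- duplicate head: same finset, no gap
        subst hba
        have hfs : (a :: a :: u).toFinset = (a :: u).toFinset := by simp
        have hg : pvGaps (a :: a :: u) = pvGaps (a :: u) := by
          simp [pvGaps]
        rw [hg, hfs]
        exact hIH
      · have hlt : a < b := lt_of_le_of_ne hab hba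
        have hanotin : a ∉ (b :: u).toFinset := by
          intro hmem
          have := hall a (List.mem_toFinset.1 hmem)
          omega
        set T := (b :: u).toFinset with hT
        have hfs : (a :: b :: u).toFinset = insert a T := by simp [hT]
        -- a is a run start in the enlarged set
        have hastart : a - 1 ∉ (a :: b :: u).toFinset := by
          rw [hfs]
          intro hmem
          rcases Finset.mem_insert.1 hmem with h | h
          · omega
          · have := hall (a - 1) (List.mem_toFinset.1 h)
            omega
        -- filter over insert a T
        have hfilter :
            ((a :: b :: u).toFinset.filter (fun v => v - 1 ∉ (a :: b :: u).toFinset)).card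
            = 1 + (T.filter (fun v => v - 1 ∉ insert a T)).card := by
          rw [hfs, Finset.filter_insert]
          rw [if_pos (by rw [← hfs]; exact hastart)]
          rw [Finset.card_insert_of_notMem (by
            intro hmem
            exact hanotin (Finset.mem_of_mem_filter a hmem))]
          omega
        have hTmem : ∀ v ∈ T, b ≤ v := fun v hv => hall v (List.mem_toFinset.1 hv)
        by_cases hb1 : b = a + 1
        · -- no gap; b stops being a run start
          have hg : pvGaps (a :: b :: u) = pvGaps (b :: u) := by
            simp [pvGaps]; omega
          have hsplit :
              T.filter (fun v => v - 1 ∉ insert a T)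
              = (T.filter (fun v => v - 1 ∉ T)).erase b := by
            ext v
            simp only [Finset.mem_filter, Finset.mem_erase, Finset.mem_insert]
            constructor
            · rintro ⟨hv, hnot⟩
              refine ⟨?_, hv, fun h => hnot (Or.inr h)⟩
              intro hvb; subst hvb
              exact hnot (Or.inl (by omega))
            · rintro ⟨hvb, hv, hnot⟩
              refine ⟨hv, ?_⟩
              rintro (h | h)
              · exact hvb (by omega)
              · exact hnot h
          have hbin : b ∈ T.filter (fun v => v - 1 ∉ T) := by
            refine Finset.mem_filter.2 ⟨by simp [hT], ?_⟩
            intro hmem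
            have := hTmem _ hmem
            omega
          rw [hfilter, hsplit, Finset.card_erase_of_mem hbin, hg, ← hIH]
          omega
        · -- gap between a and b
          have hgap : b > a + 1 := by omega
          have hg : pvGaps (a :: b :: u) = 1 + pvGaps (b :: u) := by
            simp [pvGaps]; omega
          have hsame :
              T.filter (fun v => v - 1 ∉ insert a T)
              = T.filter (fun v => v - 1 ∉ T) := by
            apply Finset.filter_congr
            intro v hv
            have hvb := hTmem v hv
            simp only [Finset.mem_insert]
            constructor
            · intro hnot h; exact hnot (Or.inr h)
            · intro hnot h
              rcases h with h | h
              · omega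
              · exact hnot h
          rw [hfilter, hsame, ← hIH, hg]

lemma pvSC_eq (coords : List Int) (hne : coords ≠ []) :
    1 + pvGaps (PySem.List.sorted coords (fun x => x) false) = pvSC coords := by
  classical
  set s := PySem.List.sorted coords (fun x => x) false with hsdef
  have hperm : s.Perm coords := PySem.List.sorted_perm coords (fun x => x) false
  have hsne : s ≠ [] := by
    intro h
    exact hne (List.Perm.eq_nil (h ▸ hperm).symm)
  have hpw : s.Pairwise (· ≤ ·) := PySem.List.sorted_pairwise coords (fun x => x)
  rw [pvMain s hpw hsne]
  unfold pvSC
  rw [pvCountP_toFinset (PySem.Set.nodup_ofList coords)]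
  have hfs1 : s.toFinset = coords.toFinset := List.toFinset_eq_of_perm _ _ hperm
  have hfs2 : (PySem.Set.ofList coords).toFinset = coords.toFinset := by
    ext v
    simp [List.mem_toFinset, PySem.Set.mem_ofList]
  rw [hfs1, ← hfs2]
  congr 1
  apply Finset.filter_congr
  intro v _
  simp [PySem.Set.mem_ofList, hfs2, List.mem_toFinset]

lemma pvGroup (coords : List Int) :
    (1 : Int) + (pvGaps (PySem.List.sorted coords (fun x => x) false) : Int)
    = max 1 ((pvSC coords : Nat) : Int) := by
  by_cases hne : coords = []
  · subst hne
    simp [pvSC, pvGaps, PySem.List.sorted, PySem.Set.ofList]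
  · have h := pvSC_eq coords hne
    have h1 : (1 : Int) + (pvGaps (PySem.List.sorted coords (fun x => x) false) : Int)
        = ((pvSC coords : Nat) : Int) := by
      rw [← h]; push_cast; ring
    rw [h1]
    have : (1 : Int) ≤ ((pvSC coords : Nat) : Int) := by
      rw [← h]; push_cast; omega
    omega

-- ===== VERDICT (by name: the statement is the Claim_ definition above) =====
theorem calculate_sides_py_spec : Claim_equal_calculate_sides_py := by
  intro perimeters _
  unfold Spec_calculate_sides_py calculate_sides_py calculate_sides_py_alt
  apply PySem.List.foldl_congr_mem
  intro acc kv _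
  dsimp only
  rw [PySem.List.foldl_ite_add_one, pvInner]
  have := pvGroup kv.2
  unfold pvSC at this
  omega
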